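-- pv_equiv track=rewrite | github.com/DcTyle/QuantumMiner | ResearchConfinement/prototyping/python/gpu_pulse_axis_dynamics.py | build_kernel_scan_order
-- ===== SOURCE A (Python) =====
-- from typing import Any, Dict
--
-- def build_kernel_scan_order(
--     grid_width: int,
--     grid_height: int,
--     direction: str,
-- ) -> list[Dict[str, int]]:
--     width = max(int(grid_width), 1)
--     height = max(int(grid_height), 1)
--     order: list[Dict[str, int]] = []
--     if direction == "left_to_right":
--         for y_coord in range(height):
--             for x_coord in range(width):
--                 order.append({"x": x_coord, "y": y_coord})
--     elif direction == "right_to_left":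
--         for y_coord in range(height):
--             for x_coord in range(width - 1, -1, -1):
--                 order.append({"x": x_coord, "y": y_coord})
--     elif direction == "top_to_bottom":
--         for x_coord in range(width):
--             for y_coord in range(height):
--                 order.append({"x": x_coord, "y": y_coord})
--     elif direction == "bottom_to_top":
--         for x_coord in range(width):
--             for y_coord in range(height - 1, -1, -1):
--                 order.append({"x": x_coord, "y": y_coord})
--     else:
--         raise ValueError(f"Unsupported scan direction: {direction}")
--     for index, coord in enumerate(order):
--         coord["kernel_index"] = int(index)
--     return order
-- ===== SOURCE B (Python) =====
-- def build_kernel_scan_order(grid_width, grid_height, direction):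
--     if direction not in ("left_to_right", "right_to_left", "top_to_bottom", "bottom_to_top"):
--         raise ValueError(f"Unsupported scan direction: {direction}")
--     width = max(int(grid_width), 1)
--     height = max(int(grid_height), 1)
--     total = width * height
--     if direction == "left_to_right":
--         return [{"x": i % width, "y": i // width, "kernel_index": i} for i in range(total)]
--     if direction == "right_to_left":
--         return [{"x": width - 1 - i % width, "y": i // width, "kernel_index": i} for i in range(total)]
--     if direction == "top_to_bottom":
--         return [{"x": i // height, "y": i % height, "kernel_index": i} for i in range(total)]
--     return [{"x": i // height, "y": height - 1 - i % height, "kernel_index": i} for i in range(total)]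
-- ===== Notes on version B (the rewrite author's own statement) =====
-- stated objective: alternative
-- what changed: B validates the direction up front and replaces A's per-direction nested row/column loops plus a second enumeration pass with a single flat comprehension over range(width*height) that computes each cell's (x, y) by % and // arithmetic and emits kernel_index in the same pass.
import Mathlib
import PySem

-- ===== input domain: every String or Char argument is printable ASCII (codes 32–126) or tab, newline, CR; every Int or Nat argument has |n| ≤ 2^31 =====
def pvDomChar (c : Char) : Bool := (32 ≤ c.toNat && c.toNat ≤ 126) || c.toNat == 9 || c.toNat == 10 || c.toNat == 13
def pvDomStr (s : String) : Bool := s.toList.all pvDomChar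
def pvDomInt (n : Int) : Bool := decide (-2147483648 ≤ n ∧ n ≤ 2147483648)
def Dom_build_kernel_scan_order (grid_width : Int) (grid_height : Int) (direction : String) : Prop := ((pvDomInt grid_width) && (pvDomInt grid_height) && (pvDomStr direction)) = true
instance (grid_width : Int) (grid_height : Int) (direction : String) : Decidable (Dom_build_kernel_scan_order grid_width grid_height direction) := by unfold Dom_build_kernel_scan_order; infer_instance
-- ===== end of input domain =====

-- B replaces A's per-direction nested loops + re-enumeration pass with one flat
-- index loop computing (x, y) by divmod; same cost, different decomposition.

-- ===== PORT A =====
def build_kernel_scan_order (grid_width : Int) (grid_height : Int) (direction : String) : List (List (String × Int)) :=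
  let width := max grid_width 1
  let height := max grid_height 1
  let order : List (List (String × Int)) :=
    if direction = "left_to_right" then
      (PySem.List.pyRange 0 height 1).foldl (fun acc y =>
        (PySem.List.pyRange 0 width 1).foldl (fun acc2 x => acc2 ++ [[("x", x), ("y", y)]]) acc) []
    else if direction = "right_to_left" then
      (PySem.List.pyRange 0 height 1).foldl (fun acc y =>
        (PySem.List.pyRange (width - 1) (-1) (-1)).foldl (fun acc2 x => acc2 ++ [[("x", x), ("y", y)]]) acc) []
    else if direction = "top_to_bottom" then
      (PySem.List.pyRange 0 width 1).foldl (fun acc x =>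
        (PySem.List.pyRange 0 height 1).foldl (fun acc2 y => acc2 ++ [[("x", x), ("y", y)]]) acc) []
    else if direction = "bottom_to_top" then
      (PySem.List.pyRange 0 width 1).foldl (fun acc x =>
        (PySem.List.pyRange (height - 1) (-1) (-1)).foldl (fun acc2 y => acc2 ++ [[("x", x), ("y", y)]]) acc) []
    else []  -- Python raises ValueError here; excluded by Pre_
  (PySem.List.enumerate order 0).map (fun p => p.2 ++ [("kernel_index", p.1)])

-- ===== PORT B =====
def build_kernel_scan_order_alt (grid_width : Int) (grid_height : Int) (direction : String) : List (List (String × Int)) :=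
  if direction = "left_to_right" ∨ direction = "right_to_left" ∨ direction = "top_to_bottom" ∨ direction = "bottom_to_top" then
    let width := max grid_width 1
    let height := max grid_height 1
    let total := width * height
    if direction = "left_to_right" then
      (PySem.List.pyRange 0 total 1).map (fun i =>
        [("x", PySem.Int.mod i width), ("y", PySem.Int.floordiv i width), ("kernel_index", i)])
    else if direction = "right_to_left" then
      (PySem.List.pyRange 0 total 1).map (fun i =>
        [("x", width - 1 - PySem.Int.mod i width), ("y", PySem.Int.floordiv i width), ("kernel_index", i)])
    else if direction = "top_to_bottom" then
      (PySem.List.pyRange 0 total 1).map (fun i =>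
        [("x", PySem.Int.floordiv i height), ("y", PySem.Int.mod i height), ("kernel_index", i)])
    else
      (PySem.List.pyRange 0 total 1).map (fun i =>
        [("x", PySem.Int.floordiv i height), ("y", height - 1 - PySem.Int.mod i height), ("kernel_index", i)])
  else []  -- Python raises ValueError here; excluded by Pre_

-- ===== PRECONDITION & SPEC =====
-- Pre_ excludes exactly the directions on which the Python A raises ValueError (B raises there too).
def Pre_build_kernel_scan_order (grid_width : Int) (grid_height : Int) (direction : String) : Prop :=
  direction = "left_to_right" ∨ direction = "right_to_left" ∨ direction = "top_to_bottom" ∨ direction = "bottom_to_top"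
instance (grid_width : Int) (grid_height : Int) (direction : String) : Decidable (Pre_build_kernel_scan_order grid_width grid_height direction) := by unfold Pre_build_kernel_scan_order; infer_instance
def pvWitness_build_kernel_scan_order : Int × Int × String := (2, 3, "left_to_right")

def Spec_build_kernel_scan_order (grid_width : Int) (grid_height : Int) (direction : String) (out : List (List (String × Int))) : Prop := out = build_kernel_scan_order_alt grid_width grid_height direction
instance (grid_width : Int) (grid_height : Int) (direction : String) (out : List (List (String × Int))) : Decidable (Spec_build_kernel_scan_order grid_width grid_height direction out) := by unfold Spec_build_kernel_scan_order; infer_instance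

-- ===== CLAIM (what is proved, stated in full; the proofs are below) =====
def Claim_equal_build_kernel_scan_order : Prop := ∀ (grid_width : Int) (grid_height : Int) (direction : String), Dom_build_kernel_scan_order grid_width grid_height direction → Pre_build_kernel_scan_order grid_width grid_height direction → Spec_build_kernel_scan_order grid_width grid_height direction (build_kernel_scan_order grid_width grid_height direction)

-- ===== LEMMAS AND PROOFS =====

-- Flattening a row-major nested traversal into one index with %, /.
lemma pv_flatMap_range {α : Type} (W : Nat) (g : Nat → Nat → α) :
    ∀ H : Nat, (List.range H).flatMap (fun y => (List.range W).map (fun x => g x y))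
      = (List.range (H * W)).map (fun i => g (i % W) (i / W)) := by
  intro H
  induction H with
  | zero => simp
  | succ H ih =>
    rw [List.range_succ, List.flatMap_append, ih, Nat.succ_mul, List.range_add, List.map_append]
    congr 1
    · simp only [List.flatMap_cons, List.flatMap_nil, List.append_nil, List.map_map]
      refine List.map_congr_left ?_
      intro x hx
      have hxW : x < W := List.mem_range.mp hx
      have h0 : 0 < W := by omega
      simp only [Function.comp]
      rw [Nat.add_comm (H * W) x, Nat.add_mul_mod_self_right, Nat.mod_eq_of_lt hxW,
        Nat.add_mul_div_right x H h0, Nat.div_eq_of_lt hxW, Nat.zero_add]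

-- enumerate over a mapped range, then a per-element rebuild, is one map over the range.
lemma pv_enum_map_range {α β : Type} (f : Nat → α) (F : Int → α → β) :
    ∀ (N : Nat) (s : Int), (PySem.List.enumerate ((List.range N).map f) s).map (fun p => F p.1 p.2)
      = (List.range N).map (fun (k : Nat) => F (s + (k : Int)) (f k)) := by
  intro N
  induction N with
  | zero => intro s; simp [PySem.List.enumerate_nil]
  | succ N ih =>
    intro s
    rw [List.range_succ, List.map_append, PySem.List.enumerate_append, List.map_append, ih]
    simp [PySem.List.enumerate_cons, PySem.List.enumerate_nil]

-- ===== VERDICT (by name: the statement is the Claim_ definition above) =====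
theorem build_kernel_scan_order_spec : Claim_equal_build_kernel_scan_order := by
  intro gw gh dir _ hpre
  unfold Spec_build_kernel_scan_order build_kernel_scan_order build_kernel_scan_order_alt
  obtain ⟨W, hW⟩ : ∃ n : Nat, max gw 1 = (n : Int) :=
    Int.eq_ofNat_of_zero_le (by omega)
  obtain ⟨H, hH⟩ : ∃ n : Nat, max gh 1 = (n : Int) :=
    Int.eq_ofNat_of_zero_le (by omega)
  rcases hpre with h | h | h | h <;> subst h <;>
    simp only [hW, hH, String.reduceEq, reduceIte, or_true, true_or]
  · simp only [PySem.List.foldl_append_singleton_eq_map, PySem.List.foldl_append_eq_flatMap,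
      List.nil_append, PySem.List.pyRange_one, sub_zero, ← Nat.cast_mul, Int.toNat_natCast,
      zero_add, List.map_map, List.flatMap_map, Function.comp_def]
    rw [pv_flatMap_range W (fun x y => [("x", (x:Int)), ("y", (y:Int))]) H,
      pv_enum_map_range (fun i => ([("x", ((i % W : Nat):Int)), ("y", ((i / W : Nat):Int))]))
        (fun i d => d ++ [("kernel_index", i)]) (H * W) 0]
    simp [PySem.Int.mod_natCast, PySem.Int.floordiv_natCast, Nat.mul_comm W H]
  · simp only [PySem.List.foldl_append_singleton_eq_map, PySem.List.foldl_append_eq_flatMap,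
      List.nil_append, PySem.List.pyRange_one, PySem.List.pyRange_neg_one, sub_zero,
      sub_neg_eq_add, sub_add_cancel, ← Nat.cast_mul, Int.toNat_natCast, zero_add,
      List.map_map, List.flatMap_map, Function.comp_def]
    rw [pv_flatMap_range W (fun x y => [("x", (W:Int) - 1 - (x:Int)), ("y", (y:Int))]) H,
      pv_enum_map_range (fun i => ([("x", (W:Int) - 1 - ((i % W : Nat):Int)), ("y", ((i / W : Nat):Int))]))
        (fun i d => d ++ [("kernel_index", i)]) (H * W) 0]
    simp [PySem.Int.mod_natCast, PySem.Int.floordiv_natCast, Nat.mul_comm W H]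
  · simp only [PySem.List.foldl_append_singleton_eq_map, PySem.List.foldl_append_eq_flatMap,
      List.nil_append, PySem.List.pyRange_one, sub_zero, ← Nat.cast_mul, Int.toNat_natCast,
      zero_add, List.map_map, List.flatMap_map, Function.comp_def]
    rw [pv_flatMap_range H (fun y x => [("x", (x:Int)), ("y", (y:Int))]) W,
      pv_enum_map_range (fun i => ([("x", ((i / H : Nat):Int)), ("y", ((i % H : Nat):Int))]))
        (fun i d => d ++ [("kernel_index", i)]) (W * H) 0]
    simp [PySem.Int.mod_natCast, PySem.Int.floordiv_natCast]
  · simp only [PySem.List.foldl_append_singleton_eq_map, PySem.List.foldl_append_eq_flatMap,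
      List.nil_append, PySem.List.pyRange_one, PySem.List.pyRange_neg_one, sub_zero,
      sub_neg_eq_add, sub_add_cancel, ← Nat.cast_mul, Int.toNat_natCast, zero_add,
      List.map_map, List.flatMap_map, Function.comp_def]
    rw [pv_flatMap_range H (fun y x => [("x", (x:Int)), ("y", (H:Int) - 1 - (y:Int))]) W,
      pv_enum_map_range (fun i => ([("x", ((i / H : Nat):Int)), ("y", (H:Int) - 1 - ((i % H : Nat):Int))]))
        (fun i d => d ++ [("kernel_index", i)]) (W * H) 0]
    simp [PySem.Int.mod_natCast, PySem.Int.floordiv_natCast]
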